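-- pv_equiv track=rewrite | github.com/jjw2341234/Online-Coding-Study | 백준/Gold/21315. 카드 섞기/카드 섞기.py | card_shuffle
-- ===== SOURCE A (Python) =====
-- def card_shuffle(prev, i, k):
--     if i > k+1:
--         return prev
--     if i == 1:
--         cnt = 2 **k
--     else:
--         cnt = 2 ** (k-i+1)
--     size = len(prev)
--     next=  prev[size - cnt:]
--     return card_shuffle(next, i+1, k) + prev[:size-cnt]
-- ===== SOURCE B (Python) =====
-- def card_shuffle(prev, i, k):
--     # Iterative: peel off each round's prefix, then assemble the result once.
--     pieces = []
--     while i <= k + 1: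
--         cnt = 2 ** k if i == 1 else 2 ** (k - i + 1)
--         size = len(prev)
--         pieces.append(prev[:size - cnt])
--         prev = prev[size - cnt:]
--         i += 1
--     out = list(prev)
--     for p in reversed(pieces):
--         out += p
--     return out
-- ===== Notes on version B (the rewrite author's own statement) =====
-- stated objective: alternative
-- what changed: Replaces A's recursion (which concatenates a growing result at every return) by an iterative loop that collects the per-round prefix slices and assembles the output in a single final pass.
import Mathlib
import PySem

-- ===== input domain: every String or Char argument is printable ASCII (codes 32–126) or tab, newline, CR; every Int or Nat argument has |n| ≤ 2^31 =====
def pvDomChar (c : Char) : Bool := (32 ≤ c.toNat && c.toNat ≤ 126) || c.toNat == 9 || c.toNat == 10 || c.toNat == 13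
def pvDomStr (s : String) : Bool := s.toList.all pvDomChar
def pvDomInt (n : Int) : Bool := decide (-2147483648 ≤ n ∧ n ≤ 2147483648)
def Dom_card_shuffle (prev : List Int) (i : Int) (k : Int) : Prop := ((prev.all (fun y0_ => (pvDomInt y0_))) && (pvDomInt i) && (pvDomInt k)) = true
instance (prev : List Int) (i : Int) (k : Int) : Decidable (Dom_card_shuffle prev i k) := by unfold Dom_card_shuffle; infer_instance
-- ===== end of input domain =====

-- B replaces A's recursion by an iterative loop collecting prefix slices, assembled once at the end (alternative structure, same cost).


-- ===== PORT A =====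
def card_shuffle (prev : List Int) (i : Int) (k : Int) : List Int :=
  if i > k + 1 then prev
  else
    let cnt : Int := if i = 1 then 2 ^ k.toNat else 2 ^ (k - i + 1).toNat
    let size : Int := prev.length
    let next := PySem.List.slice prev (some (size - cnt)) none
    card_shuffle next (i + 1) k ++ PySem.List.slice prev none (some (size - cnt))
termination_by (k + 2 - i).toNat
decreasing_by omega

-- ===== PORT B =====
-- the while loop of Source B: collects the prefix pieces (head = last collected) and the final prev
def cardShuffleLoop (prev : List Int) (i : Int) (k : Int) (pieces : List (List Int)) :
    List Int × List (List Int) :=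
  if i ≤ k + 1 then
    let cnt : Int := if i = 1 then 2 ^ k.toNat else 2 ^ (k - i + 1).toNat
    let size : Int := prev.length
    cardShuffleLoop (PySem.List.slice prev (some (size - cnt)) none) (i + 1) k
      (PySem.List.slice prev none (some (size - cnt)) :: pieces)
  else (prev, pieces)
termination_by (k + 2 - i).toNat
decreasing_by omega

def card_shuffle_alt (prev : List Int) (i : Int) (k : Int) : List Int :=
  let r := cardShuffleLoop prev i k []
  r.2.foldl (fun out p => out ++ p) r.1

-- ===== PRECONDITION & SPEC =====
-- Pre_ excludes inputs with more than 9900 shuffle rounds (k + 1 - i > 9900): there the Python A's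
-- recursion (one frame per round) exceeds the interpreter's recursion limit and raises RecursionError.
def Pre_card_shuffle (prev : List Int) (i : Int) (k : Int) : Prop := k + 1 - i ≤ 9900
instance (prev : List Int) (i : Int) (k : Int) : Decidable (Pre_card_shuffle prev i k) := by
  unfold Pre_card_shuffle; infer_instance
def pvWitness_card_shuffle : List Int × Int × Int := ([1, 2, 3, 4, 5], 1, 2)
def Spec_card_shuffle (prev : List Int) (i : Int) (k : Int) (out : List Int) : Prop := out = card_shuffle_alt prev i k
instance (prev : List Int) (i : Int) (k : Int) (out : List Int) : Decidable (Spec_card_shuffle prev i k out) := by unfold Spec_card_shuffle; infer_instance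

-- ===== CLAIM (what is proved, stated in full; the proofs are below) =====
def Claim_equal_card_shuffle : Prop := ∀ (prev : List Int) (i : Int) (k : Int), Dom_card_shuffle prev i k → Pre_card_shuffle prev i k → Spec_card_shuffle prev i k (card_shuffle prev i k)

-- ===== LEMMAS AND PROOFS =====

-- loop invariant: folding the loop's result equals folding the recursive result over the accumulator
theorem cardShuffleLoop_eq (prev : List Int) (i : Int) (k : Int) (pieces : List (List Int)) :
    (cardShuffleLoop prev i k pieces).2.foldl (fun out p => out ++ p)
      (cardShuffleLoop prev i k pieces).1
    = pieces.foldl (fun out p => out ++ p) (card_shuffle prev i k) := by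
  by_cases h : i ≤ k + 1
  · rw [cardShuffleLoop, card_shuffle]
    simp only [h, if_pos, if_neg (by omega : ¬ i > k + 1)]
    rw [cardShuffleLoop_eq]
    simp [List.foldl]
  · rw [cardShuffleLoop, card_shuffle]
    simp only [if_neg h, if_pos (by omega : i > k + 1)]
termination_by (k + 2 - i).toNat
decreasing_by omega

-- ===== VERDICT (by name: the statement is the Claim_ definition above) =====
theorem card_shuffle_spec : Claim_equal_card_shuffle := by
  intro prev i k hdom hpre
  have h := cardShuffleLoop_eq prev i k []
  simp_all [Spec_card_shuffle, card_shuffle_alt]
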